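-- pv_equiv track=rewrite | github.com/Met2348/abr | scripts/phase_a_generate_and_eval.py | _truncate_output_at_chat_markers
-- ===== SOURCE A (Python) =====
-- def _truncate_output_at_chat_markers(text: str) -> str:
--     """Trim spillover text such as `[USER]` / `Human:` from generation."""
--     lowered = text.lower()
--     markers = [
--         "[system]",
--         "[user]",
--         "[assistant]",
--         "human:",
--         "user:",
--         "assistant:",
--     ]
--     positions = [lowered.find(marker) for marker in markers]
--     positions = [pos for pos in positions if pos >= 0]
--     if not positions:
--         return text.strip()
--     return text[: min(positions)].strip()
-- ===== SOURCE B (Python) =====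
-- def _truncate_output_at_chat_markers(text: str) -> str:
--     """Trim spillover text such as `[USER]` / `Human:` from generation."""
--     markers = ("[system]", "[user]", "[assistant]", "human:", "user:", "assistant:")
--     low = text.lower()
--     for i in range(len(low)):
--         if low.startswith(markers, i):
--             return text[:i].strip()
--     return text.strip()
-- ===== Notes on version B (the rewrite author's own statement) =====
-- stated objective: idiomatic
-- what changed: Replaces the per-marker find() pass with positions list and min() by a single left-to-right scan that returns at the first index where str.startswith matches any marker (tuple form of startswith), so no positions list or min is maintained.
import Mathlib
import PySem

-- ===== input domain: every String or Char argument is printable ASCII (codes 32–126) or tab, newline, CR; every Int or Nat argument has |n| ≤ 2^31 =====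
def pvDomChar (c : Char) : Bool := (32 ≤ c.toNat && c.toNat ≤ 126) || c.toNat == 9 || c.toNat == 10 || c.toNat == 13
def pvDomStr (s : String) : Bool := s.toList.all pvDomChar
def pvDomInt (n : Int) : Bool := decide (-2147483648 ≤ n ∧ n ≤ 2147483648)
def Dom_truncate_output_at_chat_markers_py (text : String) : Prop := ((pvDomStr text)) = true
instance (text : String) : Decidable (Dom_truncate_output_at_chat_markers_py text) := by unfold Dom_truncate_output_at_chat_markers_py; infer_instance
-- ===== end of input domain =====

-- B replaces the per-marker find()+min() pass by a single left-to-right scan returning at the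
-- first index where any marker starts (idiomatic tuple startswith); same return value everywhere.

-- ===== PORT A =====
def pvMarkers : List String :=
  ["[system]", "[user]", "[assistant]", "human:", "user:", "assistant:"]

def truncate_output_at_chat_markers_py (text : String) : String :=
  let lowered := PySem.Str.lower text
  let positions := pvMarkers.map (fun m => PySem.Str.find lowered m)
  let positions := positions.filter (fun p => decide (p ≥ 0))
  match positions with
  | [] => PySem.Str.strip text
  | p :: ps => PySem.Str.strip (PySem.Str.slice text none (some (ps.foldl min p)))

-- ===== PORT B =====
-- the scan 'for i in range(len(low)): if low.startswith(markers, i): …'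
def pvAltScan (low : List Char) (i : Nat) : Option Nat :=
  if i < low.length then
    if pvMarkers.any (fun m => PySem.Chars.startswith (low.drop i) m.toList) then some i
    else pvAltScan low (i + 1)
  else none
termination_by low.length - i

def truncate_output_at_chat_markers_py_alt (text : String) : String :=
  let low := (PySem.Str.lower text).toList
  match pvAltScan low 0 with
  | some i => PySem.Str.strip (PySem.Str.slice text none (some (i : Int)))
  | none => PySem.Str.strip text

-- ===== PRECONDITION & SPEC =====
def Spec_truncate_output_at_chat_markers_py (text : String) (out : String) : Prop := out = truncate_output_at_chat_markers_py_alt text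
instance (text : String) (out : String) : Decidable (Spec_truncate_output_at_chat_markers_py text out) := by unfold Spec_truncate_output_at_chat_markers_py; infer_instance

-- ===== CLAIM (what is proved, stated in full; the proofs are below) =====
def Claim_equal_truncate_output_at_chat_markers_py : Prop := ∀ (text : String), Dom_truncate_output_at_chat_markers_py text → Spec_truncate_output_at_chat_markers_py text (truncate_output_at_chat_markers_py text)

-- ===== LEMMAS AND PROOFS =====

-- whether any marker starts at position i of low
def pvAnyAt (low : List Char) (i : Nat) : Bool :=
  pvMarkers.any (fun m => PySem.Chars.startswith (low.drop i) m.toList)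

lemma pvAnyAt_iff (low : List Char) (i : Nat) :
    pvAnyAt low i = true ↔ ∃ m ∈ pvMarkers, m.toList <+: low.drop i := by
  simp [pvAnyAt, List.any_eq_true, PySem.Chars.startswith_iff]

lemma pvMarkers_ne_nil : ∀ m ∈ pvMarkers, m.toList ≠ [] := by decide

lemma pvAnyAt_lt (low : List Char) (i : Nat) (h : pvAnyAt low i = true) : i < low.length := by
  rcases (pvAnyAt_iff low i).1 h with ⟨m, hm, hpre⟩
  by_contra hge
  rw [List.drop_eq_nil_of_le (by omega)] at hpre
  exact pvMarkers_ne_nil m hm (List.prefix_nil.mp hpre)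

lemma pvAltScan_eq_none (low : List Char) (i : Nat)
    (h : ∀ k, i ≤ k → pvAnyAt low k = false) : pvAltScan low i = none := by
  unfold pvAltScan
  split_ifs with h1 h2
  · exact absurd (h i le_rfl) (by simp [pvAnyAt] at h2 ⊢; exact h2)
  · exact pvAltScan_eq_none low (i + 1) (fun k hk => h k (by omega))
  · rfl
termination_by low.length - i

lemma pvAltScan_eq_some (low : List Char) (i j : Nat) (hij : i ≤ j)
    (hj : pvAnyAt low j = true)
    (hmin : ∀ k, i ≤ k → k < j → pvAnyAt low k = false) :
    pvAltScan low i = some j := by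
  have hjlen := pvAnyAt_lt low j hj
  unfold pvAltScan
  rcases Nat.eq_or_lt_of_le hij with heq | hlt
  · subst heq
    rw [if_pos hjlen, if_pos (by simpa [pvAnyAt] using hj)]
  · rw [if_pos (by omega),
      if_neg (by simpa [pvAnyAt] using (by simpa using hmin i le_rfl hlt : pvAnyAt low i = false))]
    exact pvAltScan_eq_some low (i + 1) j (by omega) hj (fun k hk hk' => hmin k (by omega) hk')
termination_by low.length - i

lemma pvFoldl_min_eq (p : Int) (ps : List Int) :
    some (ps.foldl min p) = PySem.List.min? (p :: ps) (fun y => y) :=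
  (PySem.List.min?_id_cons p ps).symm

theorem truncate_output_at_chat_markers_py_spec_aux (text : String) :
    truncate_output_at_chat_markers_py text = truncate_output_at_chat_markers_py_alt text := by
  unfold truncate_output_at_chat_markers_py truncate_output_at_chat_markers_py_alt
  dsimp only
  set low := (PySem.Str.lower text).toList with hlow
  have hfind : ∀ m : String, PySem.Str.find (PySem.Str.lower text) m
      = PySem.Chars.find low m.toList := by
    intro m; simp [PySem.Str.find, hlow]
  set positions := (pvMarkers.map (fun m => PySem.Str.find (PySem.Str.lower text) m)).filter
      (fun p => decide (p ≥ 0)) with hpos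
  -- membership characterization of positions
  have hmem : ∀ q : Int, q ∈ positions ↔
      (0 ≤ q ∧ ∃ m ∈ pvMarkers, PySem.Chars.find low m.toList = q) := by
    intro q
    simp only [hpos, List.mem_filter, List.mem_map, decide_eq_true_eq]
    constructor
    · rintro ⟨⟨m, hm, hq⟩, h0⟩
      exact ⟨h0, m, hm, by rw [← hfind m, hq]⟩
    · rintro ⟨h0, m, hm, hq⟩
      exact ⟨⟨m, hm, by rw [hfind m, hq]⟩, h0⟩
  cases hcase : positions with
  | nil =>
    -- no marker occurs anywhere: the scan returns none
    have hnone : pvAltScan low 0 = none := by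
      apply pvAltScan_eq_none
      intro k _
      by_contra hk
      rcases (pvAnyAt_iff low k).1 (by simpa using hk) with ⟨m, hm, hpre⟩
      have hin : PySem.Chars.isIn m.toList low = true :=
        (PySem.Chars.exists_prefix_drop_iff_isIn m.toList low).1 ⟨k, hpre⟩
      have hnn : 0 ≤ PySem.Chars.find low m.toList :=
        (PySem.Chars.find_nonneg_iff low m.toList).2 ((PySem.Chars.isIn_iff_infix _ _).mp hin)
      have : PySem.Chars.find low m.toList ∈ positions :=
        (hmem _).2 ⟨hnn, m, hm, rfl⟩
      rw [hcase] at this; exact absurd this (List.not_mem_nil)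
    rw [hnone]
  | cons p ps =>
    -- jmin is the least element of positions
    set jmin := ps.foldl min p with hjmin
    have hminq : PySem.List.min? (p :: ps) (fun y => y) = some jmin := by
      rw [← pvFoldl_min_eq]
    have hmemmin : jmin ∈ (p :: ps) := PySem.List.min?_mem hminq
    have hle : ∀ y ∈ (p :: ps), jmin ≤ y := by
      intro y hy; exact PySem.List.min?_isMin hminq y hy
    have hjmem : jmin ∈ positions := hcase ▸ hmemmin
    rcases (hmem jmin).1 hjmem with ⟨h0, m, hm, hfm⟩
    -- a marker is a prefix at jmin.toNat
    have hspec := PySem.Chars.find_spec (sub := m.toList) (s := low) (hfm ▸ h0)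
    rw [hfm] at hspec
    have hPj : pvAnyAt low jmin.toNat = true :=
      (pvAnyAt_iff low jmin.toNat).2 ⟨m, hm, hspec.1⟩
    -- nothing matches strictly before jmin
    have hminim : ∀ k, 0 ≤ k → k < jmin.toNat → pvAnyAt low k = false := by
      intro k _ hk
      by_contra hkT
      rcases (pvAnyAt_iff low k).1 (by simpa using hkT) with ⟨m', hm', hpre'⟩
      have hin' : PySem.Chars.isIn m'.toList low = true :=
        (PySem.Chars.exists_prefix_drop_iff_isIn m'.toList low).1 ⟨k, hpre'⟩
      have hnn' : 0 ≤ PySem.Chars.find low m'.toList :=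
        (PySem.Chars.find_nonneg_iff low m'.toList).2 ((PySem.Chars.isIn_iff_infix _ _).mp hin')
      have hmem' : PySem.Chars.find low m'.toList ∈ positions :=
        (hmem _).2 ⟨hnn', m', hm', rfl⟩
      have hle' : jmin ≤ PySem.Chars.find low m'.toList := hle _ (hcase ▸ hmem')
      -- find m' points at the first occurrence of m'; k is an occurrence before it
      have hspec' := PySem.Chars.find_spec (sub := m'.toList) (s := low) hnn'
      have : ¬ m'.toList <+: low.drop k := hspec'.2 k (by omega)
      exact this hpre'
    have hscan : pvAltScan low 0 = some jmin.toNat :=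
      pvAltScan_eq_some low 0 jmin.toNat (Nat.zero_le _) hPj
        (fun k hk hk' => hminim k (Nat.zero_le k) hk')
    rw [hscan]
    have : ((jmin.toNat : Int)) = jmin := Int.toNat_of_nonneg h0
    dsimp only
    rw [this, hjmin]

-- ===== VERDICT (by name: the statement is the Claim_ definition above) =====
theorem truncate_output_at_chat_markers_py_spec : Claim_equal_truncate_output_at_chat_markers_py := by
  intro text _
  exact truncate_output_at_chat_markers_py_spec_aux text
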